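-- pv_equiv track=rewrite | github.com/cjgliddon/hackathon25_blocking | tempest_extreme/extract_era5_winds.py | extend_track
-- ===== SOURCE A (Python) =====
-- def extend_track(boolean_list):
--     for i, val in enumerate(boolean_list):
--         if val:
--             first_true_index = i
--             break
--
--     for i, val in reversed(list(enumerate(boolean_list))):
--         if val:
--             last_true_index = i
--             break
--
--     for i in range(max(first_true_index - 1, 0), min(last_true_index + 1 + 1, len(boolean_list))):
--         boolean_list[i] = True
--
--     return boolean_list
-- ===== SOURCE B (Python) =====
-- def extend_track(boolean_list):
--     # Prefix/suffix cumulative-OR sweeps: out[i] is True iff some True exists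
--     # at an index <= i+1 AND some True exists at an index >= i-1.
--     n = len(boolean_list)
--     pref = []
--     run = False
--     for v in boolean_list:
--         run = run or v
--         pref.append(run)
--     suff = []
--     run = False
--     for v in reversed(boolean_list):
--         run = run or v
--         suff.append(run)
--     suff.reverse()
--     return [pref[min(i + 1, n - 1)] and suff[max(i - 1, 0)] for i in range(n)]
-- ===== Notes on version B (the rewrite author's own statement) =====
-- stated objective: alternative
-- what changed: B does no index search at all: instead of A's first/last-True index scans plus an in-place fill of the span, B computes prefix and suffix cumulative-OR sweeps and rebuilds the list from the pointwise rule out[i] = (some True at index <= i+1) and (some True at index >= i-1); A mutates and returns its argument, B returns a fresh list.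
import Mathlib
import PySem

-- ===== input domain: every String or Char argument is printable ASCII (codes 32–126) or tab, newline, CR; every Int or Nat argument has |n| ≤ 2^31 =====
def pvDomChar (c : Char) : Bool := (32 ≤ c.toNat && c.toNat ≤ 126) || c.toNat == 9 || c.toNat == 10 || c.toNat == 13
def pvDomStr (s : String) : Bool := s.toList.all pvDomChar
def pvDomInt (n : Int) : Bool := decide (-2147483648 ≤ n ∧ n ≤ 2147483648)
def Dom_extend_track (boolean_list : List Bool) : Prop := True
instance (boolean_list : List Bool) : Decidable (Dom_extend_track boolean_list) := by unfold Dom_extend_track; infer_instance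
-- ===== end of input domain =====

-- B replaces A's first/last-True index scans and in-place span fill by prefix/suffix
-- cumulative-OR sweeps and a pointwise rule (alternative decomposition); A mutates and
-- returns its argument in Python, B returns a fresh list.

-- ===== PORT A =====
-- the 'for i, val in …: if val: idx = i; break' loops of A
def findTrueIdx : List (Int × Bool) → Option Int
  | [] => none
  | (i, v) :: rest => if v then some i else findTrueIdx rest

def extend_track (boolean_list : List Bool) : List Bool :=
  match findTrueIdx (PySem.List.enumerate boolean_list),
        findTrueIdx (PySem.List.enumerate boolean_list).reverse with
  | some first_true_index, some last_true_index =>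
      -- for i in range(max(first-1,0), min(last+2, len)): boolean_list[i] = True
      (PySem.List.pyRange (max (first_true_index - 1) 0)
          (min (last_true_index + 1 + 1) (boolean_list.length : Int)) 1).foldl
        (fun acc i => acc.set i.toNat true) boolean_list
  | _, _ => boolean_list   -- UnboundLocalError in Python; excluded by Pre_

-- ===== PORT B =====
def extend_track_alt (boolean_list : List Bool) : List Bool :=
  let n : Int := boolean_list.length
  -- pref = []; run = False; for v in boolean_list: run = run or v; pref.append(run)
  let pref := (boolean_list.foldl
      (fun (p : List Bool × Bool) v => (p.1 ++ [p.2 || v], p.2 || v)) ([], false)).1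
  -- suff built the same way over reversed(boolean_list), then suff.reverse()
  let suff := ((boolean_list.reverse.foldl
      (fun (p : List Bool × Bool) v => (p.1 ++ [p.2 || v], p.2 || v)) ([], false)).1).reverse
  -- [pref[min(i+1, n-1)] and suff[max(i-1, 0)] for i in range(n)]
  -- (both indices are provably in range whenever the range is nonempty, so getD is exact)
  (PySem.List.pyRange 0 n 1).map (fun i =>
    pref.getD (min (i + 1) (n - 1)).toNat false && suff.getD (max (i - 1) 0).toNat false)

-- ===== PRECONDITION & SPEC =====
-- Pre_ excludes lists with no True (including []), on which A raises UnboundLocalError.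
def Pre_extend_track (boolean_list : List Bool) : Prop := true ∈ boolean_list
instance (boolean_list : List Bool) : Decidable (Pre_extend_track boolean_list) := by
  unfold Pre_extend_track; infer_instance
def pvWitness_extend_track : List Bool := [false, true, false, false]

def Spec_extend_track (boolean_list : List Bool) (out : List Bool) : Prop := out = extend_track_alt boolean_list
instance (boolean_list : List Bool) (out : List Bool) : Decidable (Spec_extend_track boolean_list out) := by unfold Spec_extend_track; infer_instance

-- ===== CLAIM (what is proved, stated in full; the proofs are below) =====
def Claim_equal_extend_track : Prop := ∀ (boolean_list : List Bool), Dom_extend_track boolean_list → Pre_extend_track boolean_list → Spec_extend_track boolean_list (extend_track boolean_list)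
-- ===== LEMMAS AND PROOFS =====

theorem getElemBang_eq (l : List Bool) (i : Nat) (h : i < l.length) : l[i]! = l[i] := by
  simp [List.getElem!_eq_getElem?_getD, List.getElem?_eq_getElem h]

-- A's forward scan agrees with list.index
theorem findTrueIdx_enumerate (bl : List Bool) (s : Int) :
    findTrueIdx (PySem.List.enumerate bl s)
      = (PySem.List.index? bl true).map (fun k => s + (k : Int)) := by
  induction bl generalizing s with
  | nil => simp [findTrueIdx, PySem.List.enumerate_nil, PySem.List.index?]
  | cons b t ih =>
    rw [PySem.List.enumerate_cons]
    cases b with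
    | true =>
      rw [PySem.List.index?_cons_self]
      simp [findTrueIdx]
    | false =>
      rw [PySem.List.index?_cons_of_ne _ (by simp : false ≠ true)]
      simp only [findTrueIdx, if_neg (by simp : ¬ (false = true))]
      rw [ih (s + 1)]
      cases h : PySem.List.index? t true <;> simp <;> ring

theorem findTrueIdx_append (xs ys : List (Int × Bool)) :
    findTrueIdx (xs ++ ys) = (findTrueIdx xs).or (findTrueIdx ys) := by
  induction xs with
  | nil => simp [findTrueIdx]
  | cons p t ih =>
    obtain ⟨i, v⟩ := p
    cases v <;> simp [findTrueIdx, ih]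

theorem findTrueIdx_eq_none (xs : List (Int × Bool)) (h : ∀ p ∈ xs, p.2 = false) :
    findTrueIdx xs = none := by
  induction xs with
  | nil => rfl
  | cons p t ih =>
    obtain ⟨i, v⟩ := p
    have hv := h (i, v) (by simp)
    simp at hv
    subst hv
    simp [findTrueIdx]
    exact ih (fun q hq => h q (by simp [hq]))

-- A's reversed scan finds the last True index
theorem findTrueIdx_reverse_enumerate (bl : List Bool) (l : Nat)
    (hl : l < bl.length) (ht : bl[l] = true)
    (hafter : ∀ j (hj : j < bl.length), l < j → bl[j] = false) :
    findTrueIdx (PySem.List.enumerate bl).reverse = some (l : Int) := by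
  have hsplit : bl = bl.take (l + 1) ++ bl.drop (l + 1) := (List.take_append_drop _ _).symm
  conv_lhs => rw [hsplit]
  rw [show PySem.List.enumerate (bl.take (l+1) ++ bl.drop (l+1)) = PySem.List.enumerate (bl.take (l+1) ++ bl.drop (l+1)) 0 from rfl,
    PySem.List.enumerate_append, List.reverse_append, findTrueIdx_append]
  have hdropnone : findTrueIdx (PySem.List.enumerate (bl.drop (l + 1)) (0 + (bl.take (l + 1)).length)).reverse = none := by
    apply findTrueIdx_eq_none
    intro p hp
    rw [List.mem_reverse, PySem.List.mem_enumerate_iff] at hp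
    obtain ⟨k, hk, rfl⟩ := hp
    have hk' : l + 1 + k < bl.length := by
      rw [List.length_drop] at hk; omega
    simp only [List.getElem_drop]
    exact hafter (l + 1 + k) hk' (by omega)
  rw [hdropnone, Option.none_or]
  have htake : bl.take (l + 1) = bl.take l ++ [true] := by
    rw [← ht]
    exact List.take_succ_eq_append_getElem (by omega)
  rw [htake, PySem.List.enumerate_append, List.reverse_append]
  have hlen : (bl.take l).length = l := List.length_take_of_le (by omega)
  simp [PySem.List.enumerate_cons, PySem.List.enumerate_nil, findTrueIdx, hlen]

-- the fill loop: length is preserved …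
theorem foldl_set_length (L : List Int) (xs : List Bool) :
    (L.foldl (fun acc i => acc.set i.toNat true) xs).length = xs.length := by
  induction L generalizing xs with
  | nil => rfl
  | cons j t ih => simp [List.foldl_cons, ih]

-- … and each position becomes True iff its index is in the range, else keeps its value
theorem foldl_set_getElem (L : List Int) (xs : List Bool) (i : Nat) (hi : i < xs.length)
    (hL : ∀ j ∈ L, 0 ≤ j) :
    (L.foldl (fun acc i => acc.set i.toNat true) xs)[i]!
      = if (i : Int) ∈ L then true else xs[i]! := by
  induction L generalizing xs with
  | nil => simp
  | cons j t ih =>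
    have hj : 0 ≤ j := hL j (by simp)
    have hset : (xs.set j.toNat true)[i]! = if j.toNat = i then true else xs[i]! := by
      rw [getElemBang_eq _ _ (by simpa using hi), getElemBang_eq _ _ hi, List.getElem_set]
    rw [List.foldl_cons, ih (xs.set j.toNat true) (by simpa using hi)
      (fun q hq => hL q (by simp [hq])), hset]
    by_cases hmem : (i : Int) ∈ t
    · simp [hmem]
    · by_cases hji : j = (i : Int)
      · have h2 : j.toNat = i := by omega
        simp [List.mem_cons, hmem, hji]
      · have h2 : j.toNat ≠ i := by omega
        simp [List.mem_cons, hmem, h2, Ne.symm hji]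

-- characterisation of list.index's result
theorem index?_char (bl : List Bool) (f : Nat) (h : PySem.List.index? bl true = some f) :
    ∃ (hf : f < bl.length), bl[f] = true ∧ ∀ j (hj : j < bl.length), j < f → bl[j] = false := by
  obtain ⟨hk, hv, hbefore⟩ := PySem.List.getElem_of_index?_eq_some h
  refine ⟨hk, hv, ?_⟩
  intro j hj hjf
  have := hbefore j hjf
  simpa using this

-- B-side: closed recursive form of the cumulative-OR sweep
def scanOrFrom (run : Bool) : List Bool → List Bool
  | [] => []
  | v :: t => (run || v) :: scanOrFrom (run || v) t

theorem foldl_scanOr (bl : List Bool) (acc : List Bool) (run : Bool) :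
    (bl.foldl (fun (p : List Bool × Bool) v => (p.1 ++ [p.2 || v], p.2 || v)) (acc, run)).1
      = acc ++ scanOrFrom run bl := by
  induction bl generalizing acc run with
  | nil => simp [scanOrFrom]
  | cons v t ih => simp [List.foldl_cons, scanOrFrom, ih]

theorem length_scanOrFrom (run : Bool) (bl : List Bool) :
    (scanOrFrom run bl).length = bl.length := by
  induction bl generalizing run with
  | nil => rfl
  | cons v t ih => simp [scanOrFrom, ih]

theorem scanOrFrom_getElem (bl : List Bool) (run : Bool) (j : Nat) (hj : j < bl.length) :
    (scanOrFrom run bl)[j]'(by rw [length_scanOrFrom]; exact hj)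
      = (run || (bl.take (j + 1)).any id) := by
  induction bl generalizing run j with
  | nil => simp at hj
  | cons v t ih =>
    cases j with
    | zero => simp [scanOrFrom]
    | succ k =>
      have hk : k < t.length := by simpa using hj
      have hrec := ih (run || v) k hk
      simp only [scanOrFrom, List.getElem_cons_succ]
      rw [hrec]
      simp [Bool.or_assoc]

-- the sweep from False computes 'first True index ≤ j'
theorem scanOrFrom_first (bl : List Bool) (f : Nat) (hf : f < bl.length)
    (hval : bl[f] = true) (hbefore : ∀ j (hj : j < bl.length), j < f → bl[j] = false)
    (j : Nat) (hj : j < bl.length) :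
    (scanOrFrom false bl)[j]'(by rw [length_scanOrFrom]; exact hj) = decide (f ≤ j) := by
  rw [scanOrFrom_getElem bl false j hj, Bool.false_or]
  by_cases h : f ≤ j
  · rw [decide_eq_true h, List.any_eq_true]
    refine ⟨true, ?_, rfl⟩
    have hfl : f < (bl.take (j + 1)).length := by simp; omega
    have heq : (bl.take (j + 1))[f]'hfl = bl[f]'hf := List.getElem_take
    rw [← hval, ← heq]
    exact List.getElem_mem hfl
  · rw [decide_eq_false h, List.any_eq_false]
    intro x hx
    obtain ⟨k, hk, rfl⟩ := List.getElem_of_mem hx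
    have hk2 : k < bl.length := by
      have := hk; simp at this; omega
    rw [List.getElem_take]
    have hkj : k < j + 1 := by have := hk; simp at this; omega
    have : bl[k]'hk2 = false := hbefore k hk2 (by omega)
    simp [this]

-- ===== VERDICT (by name: the statement is the Claim_ definition above) =====
theorem extend_track_spec : Claim_equal_extend_track := by
  intro bl _ hpre
  unfold Spec_extend_track
  obtain ⟨f, hf⟩ := Option.isSome_iff_exists.mp ((PySem.List.index?_isSome_iff _ _).mpr hpre)
  obtain ⟨r, hr⟩ := Option.isSome_iff_exists.mp
    ((PySem.List.index?_isSome_iff _ _).mpr (List.mem_reverse.mpr hpre))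
  obtain ⟨hflt, hfval, hfbefore⟩ := index?_char bl f hf
  obtain ⟨hrlt', hrval', hrbefore'⟩ := index?_char bl.reverse r hr
  have hn : bl.reverse.length = bl.length := List.length_reverse
  set n := bl.length with hndef
  have hrlt : r < n := by omega
  set l : Nat := n - 1 - r with hldef
  have hrl : r = n - 1 - l := by omega
  have hlval : bl[l]'(by omega) = true := by
    rw [List.getElem_reverse] at hrval'
    have : bl.length - 1 - r = l := by omega
    simpa [this] using hrval'
  have hlafter : ∀ j (hj : j < n), l < j → bl[j] = false := by
    intro j hj hlj
    have h1 : n - 1 - j < r := by omega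
    have h2 : n - 1 - j < bl.reverse.length := by omega
    have := hrbefore' (n - 1 - j) h2 h1
    rw [List.getElem_reverse] at this
    have he : bl.length - 1 - (n - 1 - j) = j := by omega
    simpa [he] using this
  -- evaluate port A's two scans
  have hA1 : findTrueIdx (PySem.List.enumerate bl) = some (f : Int) := by
    rw [findTrueIdx_enumerate, hf]; simp
  have hA2 : findTrueIdx (PySem.List.enumerate bl).reverse = some (l : Int) :=
    findTrueIdx_reverse_enumerate bl l (by omega) hlval hlafter
  -- evaluate port B's two sweeps
  have hpref : (bl.foldl (fun (p : List Bool × Bool) v => (p.1 ++ [p.2 || v], p.2 || v))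
      (([] : List Bool), false)).1 = scanOrFrom false bl := by
    rw [foldl_scanOr]; simp
  have hsuff : (bl.reverse.foldl (fun (p : List Bool × Bool) v => (p.1 ++ [p.2 || v], p.2 || v))
      (([] : List Bool), false)).1 = scanOrFrom false bl.reverse := by
    rw [foldl_scanOr]; simp
  unfold extend_track extend_track_alt
  rw [hA1, hA2]
  simp only [hpref, hsuff]
  apply List.ext_getElem
  · rw [foldl_set_length]
    simp [PySem.List.length_pyRange_one]
  · intro i hi1 hi2
    have hin : i < n := by
      have := hi1; rwa [foldl_set_length] at this
    have hnpos : 0 < n := by omega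
    rw [← getElemBang_eq _ _ hi1,
      foldl_set_getElem _ _ _ hin
        (by intro j hj; rw [PySem.List.mem_pyRange_one] at hj; omega),
      getElemBang_eq _ _ hin,
      List.getElem_map, PySem.List.getElem_pyRange_one]
    -- evaluate B's two lookups
    have hidx1 : (min ((0 : Int) + (i : Int) + 1) ((n : Int) - 1)).toNat < bl.length := by omega
    have hidx2 : (max ((0 : Int) + (i : Int) - 1) 0).toNat < bl.reverse.length := by
      rw [hn]; omega
    rw [List.getD_eq_getElem _ _ (by rw [length_scanOrFrom]; exact hidx1),
        List.getD_eq_getElem _ _ (by rw [List.length_reverse, length_scanOrFrom]; exact hidx2)]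
    have hrev : ((scanOrFrom false bl.reverse).reverse)[(max ((0:Int) + (i:Int) - 1) 0).toNat]'(by
          rw [List.length_reverse, length_scanOrFrom]; exact hidx2)
        = (scanOrFrom false bl.reverse)[bl.reverse.length - 1 - (max ((0:Int) + (i:Int) - 1) 0).toNat]'(by
          rw [length_scanOrFrom]
          have := hidx2; omega) := by
      rw [List.getElem_reverse]
      congr 1
      rw [length_scanOrFrom]
    rw [hrev,
      scanOrFrom_first bl f hflt hfval hfbefore _ hidx1,
      scanOrFrom_first bl.reverse r hrlt'
        (by simpa using hrval') (by intro j hj hjr; exact hrbefore' j hj hjr) _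
        (by have := hidx2; omega)]
    simp only [PySem.List.mem_pyRange_one]
    by_cases hmem : max ((f : Int) - 1) 0 ≤ (i : Int) ∧ (i : Int) < min ((l : Int) + 1 + 1) ((bl.length : Nat) : Int)
    · rw [if_pos hmem]
      symm
      rw [Bool.and_eq_true, decide_eq_true_eq, decide_eq_true_eq]
      constructor <;> omega
    · rw [if_neg hmem]
      have hcases : (i : Int) < (f : Int) - 1 ∨ (l : Int) + 2 ≤ (i : Int) := by omega
      have hfalse : bl[i]'hin = false := by
        rcases hcases with h | h
        · exact hfbefore i hin (by omega)
        · exact hlafter i hin (by omega)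
      rw [hfalse]
      symm
      rw [Bool.and_eq_false_iff]
      rcases hcases with h | h
      · left; rw [decide_eq_false_iff_not]; omega
      · right; rw [decide_eq_false_iff_not]; omega
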